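-- pv_equiv track=rewrite | github.com/navarlu/Pepper | src/cli_voice.py | _strip_trailing_unbalanced_quote
-- ===== SOURCE A (Python) =====
-- def _strip_trailing_unbalanced_quote(text: str) -> str:
--     cnt = 0
--     i = 0
--     while i < len(text):
--         if text[i] == '"':
--             esc = False
--             j = i - 1
--             while j >= 0 and text[j] == "\\":
--                 esc = not esc
--                 j -= 1
--             if not esc:
--                 cnt += 1
--         i += 1
--     if cnt % 2 == 1 and text.rstrip().endswith('"'):
--         return text.rstrip()[:-1].rstrip()
--     return text
-- ===== SOURCE B (Python) =====
-- def _strip_trailing_unbalanced_quote(text: str) -> str: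
--     # one forward pass with an escape-parity flag instead of A's backward rescan per quote
--     cnt = 0
--     esc = False
--     for ch in text:
--         if ch == '\\':
--             esc = not esc
--         elif ch == '"' and not esc:
--             cnt += 1
--             esc = False
--         else:
--             esc = False
--     stripped = text.rstrip()
--     if cnt % 2 == 1 and stripped.endswith('"'):
--         return stripped[:-1].rstrip()
--     return text
-- ===== Notes on version B (the rewrite author's own statement) =====
-- stated objective: faster
-- what changed: Replaces A's per-quote backward backslash-rescan (quadratic on backslash runs) with a single forward pass carrying an escape-parity flag; the trailing strip reuses one precomputed rstrip.
import Mathlib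
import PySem

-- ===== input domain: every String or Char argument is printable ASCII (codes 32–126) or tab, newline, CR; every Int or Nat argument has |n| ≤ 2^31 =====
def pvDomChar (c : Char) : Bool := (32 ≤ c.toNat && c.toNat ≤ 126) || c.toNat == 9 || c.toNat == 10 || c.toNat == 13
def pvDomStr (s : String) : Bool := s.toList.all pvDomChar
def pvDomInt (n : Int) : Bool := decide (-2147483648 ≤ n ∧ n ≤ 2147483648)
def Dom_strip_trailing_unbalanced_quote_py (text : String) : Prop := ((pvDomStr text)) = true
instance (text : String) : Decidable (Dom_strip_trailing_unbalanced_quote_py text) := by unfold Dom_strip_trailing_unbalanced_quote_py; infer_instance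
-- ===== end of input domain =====

-- B replaces A's per-quote backward backslash rescan by one forward pass with an escape flag (objective: faster).

-- ===== PORT A =====
-- inner while loop: j runs from i-1 down while text[j] == '\\'; jp encodes j+1 so jp = 0 means j = -1
def pvEscLoopA (cs : List Char) : Nat → Bool → Bool
  | 0, esc => esc
  | jp+1, esc => if cs.getD jp ' ' == '\\' then pvEscLoopA cs jp (!esc) else esc

-- outer while loop over i = 0 .. len-1 (indices always in range, so getD is exact)
def pvCntA (cs : List Char) : Nat :=
  (List.range cs.length).foldl
    (fun cnt i =>
      if cs.getD i ' ' == '"' then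
        (if !(pvEscLoopA cs i false) then cnt + 1 else cnt)
      else cnt) 0

def strip_trailing_unbalanced_quote_py (text : String) : String :=
  let cnt := pvCntA text.toList
  if cnt % 2 == 1 && PySem.Str.endswith (PySem.Str.rstrip text) "\"" then
    PySem.Str.rstrip (PySem.Str.slice (PySem.Str.rstrip text) none (some (-1)))
  else text

-- ===== PORT B =====
def pvStepB (st : Nat × Bool) (c : Char) : Nat × Bool :=
  if c == '\\' then (st.1, !st.2)
  else if c == '"' && !st.2 then (st.1 + 1, false)
  else (st.1, false)

def strip_trailing_unbalanced_quote_py_alt (text : String) : String :=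
  let cnt := (text.toList.foldl pvStepB (0, false)).1
  let stripped := PySem.Str.rstrip text
  if cnt % 2 == 1 && PySem.Str.endswith stripped "\"" then
    PySem.Str.rstrip (PySem.Str.slice stripped none (some (-1)))
  else text

-- ===== PRECONDITION & SPEC =====
def Spec_strip_trailing_unbalanced_quote_py (text : String) (out : String) : Prop := out = strip_trailing_unbalanced_quote_py_alt text
instance (text : String) (out : String) : Decidable (Spec_strip_trailing_unbalanced_quote_py text out) := by unfold Spec_strip_trailing_unbalanced_quote_py; infer_instance

-- ===== CLAIM (what is proved, stated in full; the proofs are below) =====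
def Claim_equal_strip_trailing_unbalanced_quote_py : Prop := ∀ (text : String), Dom_strip_trailing_unbalanced_quote_py text → Spec_strip_trailing_unbalanced_quote_py text (strip_trailing_unbalanced_quote_py text)

-- ===== LEMMAS AND PROOFS =====

-- escape parity of the trailing backslash run (= B's esc flag after a prefix)
def pvE (cs : List Char) : Bool := cs.foldl (fun e c => if c == '\\' then !e else false) false

lemma pvE_append (cs : List Char) (c : Char) :
    pvE (cs ++ [c]) = if c == '\\' then !(pvE cs) else false := by
  simp [pvE, List.foldl_append]

lemma pvEscLoopA_eq (cs : List Char) (jp : Nat) (hjp : jp ≤ cs.length) (esc : Bool) :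
    pvEscLoopA cs jp esc = xor esc (pvE (cs.take jp)) := by
  induction jp generalizing esc with
  | zero => simp [pvEscLoopA, pvE]
  | succ n ih =>
    have hn : n < cs.length := hjp
    have htake : cs.take (n+1) = cs.take n ++ [cs[n]] := by
      rw [List.take_add_one]
      simp [List.getElem?_eq_getElem hn]
    have hget : cs.getD n ' ' = cs[n] := by
      simp [List.getD, List.getElem?_eq_getElem hn]
    rw [pvEscLoopA, hget, htake, pvE_append]
    by_cases hc : cs[n] = '\\'
    · simp only [hc, beq_self_eq_true]
      rw [ih (le_of_lt hn)]
      cases esc <;> cases pvE (cs.take n) <;> rfl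
    · have : (cs[n] == '\\') = false := by simp [hc]
      simp [this]
  -- (htake/hget: index n is in range)

def pvP (cs : List Char) (i : Nat) : Bool := cs.getD i ' ' == '"' && !(pvE (cs.take i))

lemma foldl_count (p : Nat → Bool) (l : List Nat) (n : Nat) :
    l.foldl (fun cnt i => if p i then cnt + 1 else cnt) n = n + l.countP p := by
  induction l generalizing n with
  | nil => simp
  | cons a t ih =>
    simp only [List.foldl_cons, List.countP_cons, ih]
    by_cases h : p a <;> simp [h] <;> omega

lemma pvCntA_eq_countP (cs : List Char) :
    pvCntA cs = (List.range cs.length).countP (pvP cs) := by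
  unfold pvCntA
  have h1 : ∀ (l : List Nat), (∀ i ∈ l, i < cs.length) → ∀ n : Nat,
      l.foldl (fun cnt i =>
        if cs.getD i ' ' == '"' then
          (if !(pvEscLoopA cs i false) then cnt + 1 else cnt)
        else cnt) n
      = l.foldl (fun cnt i => if pvP cs i then cnt + 1 else cnt) n := by
    intro l hl
    induction l with
    | nil => intro n; rfl
    | cons a t ih =>
      intro n
      have ha : a < cs.length := hl a (by simp)
      have hstep : (if cs.getD a ' ' == '"' then
            (if !(pvEscLoopA cs a false) then n + 1 else n) else n)
          = (if pvP cs a then n + 1 else n) := by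
        rw [pvP, pvEscLoopA_eq cs a (le_of_lt ha)]
        by_cases h1 : cs.getD a ' ' == '"' <;> by_cases h2 : pvE (cs.take a) <;>
          simp [h2]
      simp only [List.foldl_cons, hstep]
      exact ih (fun i hi => hl i (by simp [hi])) _
  rw [h1 _ (fun i hi => (List.mem_range).1 hi) 0, foldl_count]
  simp

-- one-element extension of the spec count
lemma countP_snoc (cs : List Char) (c : Char) :
    (List.range (cs ++ [c]).length).countP (pvP (cs ++ [c]))
      = (List.range cs.length).countP (pvP cs)
        + (if c == '"' && !(pvE cs) then 1 else 0) := by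
  have hlen : (cs ++ [c]).length = cs.length + 1 := by simp
  rw [hlen, List.range_succ, List.countP_append]
  congr 1
  · apply List.countP_congr
    intro i hi
    have hi' : i < cs.length := (List.mem_range).1 hi
    unfold pvP
    have hget : (cs ++ [c]).getD i ' ' = cs.getD i ' ' := by
      simp [List.getD, List.getElem?_append_left hi']
    have htake : (cs ++ [c]).take i = cs.take i := by
      rw [List.take_append_of_le_length (le_of_lt hi')]
    rw [hget, htake]
  · have hget : (cs ++ [c]).getD cs.length ' ' = c := by
      simp [List.getD]
    have htake : (cs ++ [c]).take cs.length = cs := by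
      simp
    simp only [List.countP_cons, List.countP_nil, pvP, hget, htake]
    by_cases h : c == '"' && !(pvE cs) <;> simp [h]

lemma foldlB_eq (cs : List Char) :
    cs.foldl pvStepB (0, false)
      = ((List.range cs.length).countP (pvP cs), pvE cs) := by
  induction cs using List.reverseRecOn with
  | nil => rfl
  | append_singleton cs c ih =>
    rw [List.foldl_append, ih, countP_snoc, pvE_append]
    unfold pvStepB
    by_cases h1 : c = '\\'
    · simp [h1]
    · by_cases h2 : c = '"' <;> by_cases h3 : pvE cs <;> simp [h1, h2, h3]

lemma cnt_eq (cs : List Char) : pvCntA cs = (cs.foldl pvStepB (0, false)).1 := by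
  rw [foldlB_eq, pvCntA_eq_countP]

-- ===== VERDICT (by name: the statement is the Claim_ definition above) =====
theorem strip_trailing_unbalanced_quote_py_spec : Claim_equal_strip_trailing_unbalanced_quote_py := by
  intro text _
  unfold Spec_strip_trailing_unbalanced_quote_py
  unfold strip_trailing_unbalanced_quote_py strip_trailing_unbalanced_quote_py_alt
  rw [cnt_eq]
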